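-- pv_equiv track=rewrite | github.com/EvanNingduoZhao/LeetCode | wayfair/wayfairOA/deleteToNoConsecutive3.py | deleteToNoConsecutive3
-- ===== SOURCE A (Python) =====
-- def deleteToNoConsecutive3(s):
--     if not s or len(s)<3:
--         return s
--     chars=[]
--     counter=0
--     lastChar=None
--     for char in s:
--         if lastChar==None:
--             lastChar=char
--             counter=1
--             chars.append(char)
--         else:
--             if char==lastChar:
--                if counter<2:
--                    counter+=1
--                    chars.append(char)
--                else:
--                    continue
--             else:
--                 chars.append(char)
--                 lastChar=char
--                 counter=1
--     return ''.join(chars)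
-- ===== SOURCE B (Python) =====
-- def deleteToNoConsecutive3(s):
--     if not s or len(s) < 3:
--         return s
--     out = []
--     i = 0
--     n = len(s)
--     while i < n:
--         j = i
--         while j < n and s[j] == s[i]:
--             j += 1
--         out.append(s[i:j][:2])
--         i = j
--     return ''.join(out)
-- ===== Notes on version B (the rewrite author's own statement) =====
-- stated objective: alternative
-- what changed: B splits the string into maximal runs with a two-index scan and emits at most two characters per run, instead of A's per-character state machine tracking lastChar and a saturating counter.
import Mathlib
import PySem

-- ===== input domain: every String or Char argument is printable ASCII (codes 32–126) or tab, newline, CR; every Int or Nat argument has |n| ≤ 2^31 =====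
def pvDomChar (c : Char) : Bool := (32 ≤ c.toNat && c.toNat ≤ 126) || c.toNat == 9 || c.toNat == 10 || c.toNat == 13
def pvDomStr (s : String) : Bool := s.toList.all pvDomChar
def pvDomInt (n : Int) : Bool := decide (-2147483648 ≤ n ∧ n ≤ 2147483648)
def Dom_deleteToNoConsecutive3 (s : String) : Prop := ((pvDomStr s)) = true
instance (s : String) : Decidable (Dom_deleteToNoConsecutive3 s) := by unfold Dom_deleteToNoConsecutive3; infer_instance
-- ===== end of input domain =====

-- B restructures A: a two-index run scan emitting capped runs, instead of A's per-character lastChar/counter state machine ("alternative").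

-- ===== PORT A =====
-- one step of A's for-loop; state = (chars, counter, lastChar)
def pvAStep (st : List Char × Int × Option Char) (c : Char) : List Char × Int × Option Char :=
  match st with
  | (chars, counter, lastChar) =>
    match lastChar with
    | none => (chars ++ [c], 1, some c)
    | some l =>
      if c == l then
        if counter < 2 then (chars ++ [c], counter + 1, some c)
        else (chars, counter, lastChar)  -- continue
      else (chars ++ [c], 1, some c)

def deleteToNoConsecutive3 (s : String) : String :=
  if s.toList = [] ∨ s.toList.length < 3 then s
  else String.mk (s.toList.foldl pvAStep ([], 0, none)).1

-- ===== PORT B =====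
-- inner while loop of Source B: extract the maximal run at the front, cap it at 2 chars, recurse on the rest
def pvCappedRuns : List Char → List (List Char)
  | [] => []
  | c :: t =>
    let p := t.span (· == c)
    ((c :: p.1).take 2) :: pvCappedRuns p.2
termination_by l => l.length
decreasing_by
  simp only [List.span_eq_takeWhile_dropWhile]
  exact Nat.lt_succ_of_le (List.length_dropWhile_le _ _)

def deleteToNoConsecutive3_alt (s : String) : String :=
  if s.toList = [] ∨ s.toList.length < 3 then s
  else String.mk (pvCappedRuns s.toList).flatten

-- ===== PRECONDITION & SPEC =====
def Spec_deleteToNoConsecutive3 (s : String) (out : String) : Prop := out = deleteToNoConsecutive3_alt s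
instance (s : String) (out : String) : Decidable (Spec_deleteToNoConsecutive3 s out) := by unfold Spec_deleteToNoConsecutive3; infer_instance

-- ===== CLAIM (what is proved, stated in full; the proofs are below) =====
def Claim_equal_deleteToNoConsecutive3 : Prop := ∀ (s : String), Dom_deleteToNoConsecutive3 s → Spec_deleteToNoConsecutive3 s (deleteToNoConsecutive3 s)

-- ===== LEMMAS AND PROOFS =====

-- folding A's step over a run of characters all equal to the current lastChar
theorem pvFold_run (l : Char) (r : List Char) (hr : ∀ x ∈ r, x = l) :
    ∀ (u ch : List Char) (cnt : Int), (cnt = 1 ∨ cnt = 2) →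
    (r ++ u).foldl pvAStep (ch, cnt, some l)
      = u.foldl pvAStep (ch ++ r.take (if cnt = 1 then 1 else 0),
          (if cnt = 2 ∨ r ≠ [] then 2 else 1 : Int), some l) := by
  induction r with
  | nil =>
    intro u ch cnt hcnt
    rcases hcnt with h | h <;> simp [h]
  | cons x r' ih =>
    intro u ch cnt hcnt
    have hx : x = l := hr x (by simp)
    have hr' : ∀ y ∈ r', y = l := fun y hy => hr y (by simp [hy])
    rcases hcnt with h | h
    · -- counter = 1: this char is kept, counter becomes 2
      simp only [List.cons_append, List.foldl_cons, pvAStep, hx, h]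
      norm_num
      rw [← List.foldl_append, ih hr' u (ch ++ [l]) 2 (Or.inr rfl)]
      simp
    · -- counter = 2: char skipped
      simp only [List.cons_append, List.foldl_cons, pvAStep, hx, h]
      norm_num
      rw [← List.foldl_append, ih hr' u ch 2 (Or.inr rfl)]
      simp

-- main invariant: after seeing one fresh char l (counter = 1), the fold over the
-- rest produces the already-emitted chars followed by the capped runs of l :: t
theorem pvFold_runs (n : Nat) : ∀ (t : List Char), t.length ≤ n → ∀ (l : Char) (ch : List Char),
    (t.foldl pvAStep (ch ++ [l], 1, some l)).1 = ch ++ (pvCappedRuns (l :: t)).flatten := by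
  induction n with
  | zero =>
    intro t ht l ch
    have : t = [] := List.length_eq_zero_iff.mp (Nat.le_zero.mp ht)
    subst this
    simp [pvCappedRuns]
  | succ n ih =>
    intro t ht l ch
    rcases hspan : t.span (· == l) with ⟨r, rest⟩
    have hspan' : t.span (· == l) = (t.takeWhile (· == l), t.dropWhile (· == l)) :=
      List.span_eq_takeWhile_dropWhile ..
    rw [hspan] at hspan'
    have hrdef : r = t.takeWhile (· == l) := congrArg Prod.fst hspan'
    have hrestdef : rest = t.dropWhile (· == l) := congrArg Prod.snd hspan'
    have hsplit : t = r ++ rest := by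
      rw [hrdef, hrestdef]; exact (List.takeWhile_append_dropWhile).symm
    have hrall : ∀ x ∈ r, x = l := by
      intro x hx
      rw [hrdef] at hx
      simpa using List.mem_takeWhile_imp hx
    have hruns : pvCappedRuns (l :: t) = ((l :: r).take 2) :: pvCappedRuns rest := by
      rw [pvCappedRuns]
      simp only [List.span_eq_takeWhile_dropWhile]
      rw [← hrdef, ← hrestdef]
    conv_lhs => rw [hsplit]
    rw [pvFold_run l r hrall rest (ch ++ [l]) 1 (Or.inl rfl)]
    rcases hrest : rest with _ | ⟨c, rest'⟩
    · subst hrest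
      simp [hruns, pvCappedRuns]
    · -- rest = c :: rest' with c ≠ l: the loop resets on c, then induction applies
      have hdrop : t.dropWhile (· == l) = c :: rest' := by rw [← hrestdef, hrest]
      have hc : ¬ (c == l) = true := by
        have hhd := List.head_dropWhile_not (p := (· == l)) (l := t) (by simp [hdrop])
        simp only [hdrop] at hhd
        simpa using hhd
      have hlen : rest'.length ≤ n := by
        have h1 := ht
        rw [hsplit, hrest] at h1
        simp at h1
        omega
      simp only [List.foldl_cons, pvAStep, hc]
      norm_num
      have h := ih rest' hlen c (ch ++ [l] ++ r.take 1)
      simp only [List.append_assoc, List.cons_append,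
        List.nil_append] at h ⊢
      rw [h]
      simp [hruns, hrest]

-- ===== VERDICT (by name: the statement is the Claim_ definition above) =====
theorem deleteToNoConsecutive3_spec : Claim_equal_deleteToNoConsecutive3 := by
  intro s _
  unfold Spec_deleteToNoConsecutive3 deleteToNoConsecutive3 deleteToNoConsecutive3_alt
  by_cases h : s.toList = [] ∨ s.toList.length < 3
  · rw [if_pos h, if_pos h]
  · rw [if_neg h, if_neg h]
    rcases hs : s.toList with _ | ⟨c, t⟩
    · exact absurd (Or.inl hs) h
    · simp only [List.foldl_cons, pvAStep]
      have := pvFold_runs t.length t le_rfl c ([] : List Char)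
      simpa using congrArg String.mk this
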